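-- pv_equiv track=rewrite | github.com/flipcoder/midimech | src/core.py | rotate_mode
-- ===== SOURCE A (Python) =====
-- import os, sys, glm, copy, binascii, struct, math, traceback, signal
--
-- def rotate_mode(notes: str, mode: int):
--     """Rotates a mode string (see: scales.yaml strings with x and .)"""
--     notes = copy.copy(notes)
--     while mode:
--         if notes[0] == 'x':
--             notes = notes[1:] + notes[0]
--         while notes[0] == '.':
--             notes = notes[1:] + notes[0]
--         mode -= 1
--     return notes
-- ===== SOURCE B (Python) =====
-- def rotate_mode(notes: str, mode: int):
--     """Rotates a mode string (see: scales.yaml strings with x and .)"""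
--     n = len(notes)
--     i = 0
--     while mode:
--         j = i + 1 if notes[i % n] == 'x' else i
--         while notes[j % n] == '.':
--             j += 1
--         if j == i:
--             break  # front char blocks: no later iteration can change anything
--         i = j
--         mode -= 1
--     r = i % n if n else 0
--     return notes[r:] + notes[:r]
-- ===== Notes on version B (the rewrite author's own statement) =====
-- stated objective: faster
-- what changed: B replaces A's repeated one-character string rotations (each copying the whole string) by an integer index advanced with modulo arithmetic, a break once the front character can never change again, and a single final slice.
import Mathlib
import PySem

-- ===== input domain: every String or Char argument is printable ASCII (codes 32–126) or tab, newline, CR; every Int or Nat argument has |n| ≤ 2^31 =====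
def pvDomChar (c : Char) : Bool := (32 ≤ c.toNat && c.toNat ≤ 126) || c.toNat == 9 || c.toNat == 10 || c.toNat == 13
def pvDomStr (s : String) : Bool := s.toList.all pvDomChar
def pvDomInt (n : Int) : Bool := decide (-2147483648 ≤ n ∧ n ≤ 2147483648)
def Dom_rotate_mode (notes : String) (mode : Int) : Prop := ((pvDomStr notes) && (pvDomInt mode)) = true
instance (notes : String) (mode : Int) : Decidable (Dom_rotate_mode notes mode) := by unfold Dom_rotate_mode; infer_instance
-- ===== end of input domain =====

-- B replaces A's per-step whole-string rotations by an advancing index with modulo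
-- arithmetic, an early break once the front character blocks, and one final slice.

-- ===== PORT A =====
-- inner `while notes[0] == '.'` loop of A; fuel = list length suffices on Pre_
-- (some char is not '.', so at most length-1 rotations happen); the fuel only makes
-- the loop total — where it would run out, Python A diverges (outside Pre_).
def dotSpin : List Char → Nat → List Char
  | l, 0 => l
  | [], _ + 1 => []
  | c :: rest, fuel + 1 => if c = '.' then dotSpin (rest ++ [c]) fuel else c :: rest

-- outer `while mode:` loop of A, run mode.toNat times (Pre_ has 0 ≤ mode; for
-- negative mode Python diverges). The [] case is Python's IndexError (outside Pre_).
def rotA : List Char → Nat → List Char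
  | l, 0 => l
  | l, m + 1 =>
    let l1 := match l with
      | [] => []
      | c :: rest => if c = 'x' then rest ++ [c] else c :: rest
    rotA (dotSpin l1 l1.length) m

def rotate_mode (notes : String) (mode : Int) : String :=
  String.mk (rotA notes.toList mode.toNat)

-- ===== PORT B =====
-- inner `while notes[j % n] == '.'` of B; fuel = n suffices on Pre_ (some char ≠ '.').
def dotSkip (l : List Char) : Nat → Nat → Nat
  | j, 0 => j
  | j, fuel + 1 => if l.getD (j % l.length) ' ' = '.' then dotSkip l (j + 1) fuel else j

-- outer `while mode:` of B, with the early break when the index did not move.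
def loopB (l : List Char) : Nat → Nat → Nat
  | i, 0 => i
  | i, m + 1 =>
    let j0 := if l.getD (i % l.length) ' ' = 'x' then i + 1 else i
    let j := dotSkip l j0 l.length
    if j = i then i else loopB l j m

def rotate_mode_alt (notes : String) (mode : Int) : String :=
  let l := notes.toList
  let i := loopB l 0 mode.toNat
  let r := if l.length = 0 then 0 else i % l.length
  String.mk (l.drop r ++ l.take r)

-- ===== PRECONDITION & SPEC =====
-- Pre_ excludes exactly the inputs on which Python A never returns: empty notes with
-- mode ≠ 0 (IndexError), negative mode (infinite outer loop), and mode > 0 with notes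
-- consisting only of '.' (infinite inner loop).
def Pre_rotate_mode (notes : String) (mode : Int) : Prop :=
  mode = 0 ∨ (0 < mode ∧ notes.toList ≠ [] ∧ notes.toList.any (fun c => c ≠ '.') = true)
instance (notes : String) (mode : Int) : Decidable (Pre_rotate_mode notes mode) := by
  unfold Pre_rotate_mode; infer_instance
def pvWitness_rotate_mode : String × Int := ("x.x..x.", 3)

def Spec_rotate_mode (notes : String) (mode : Int) (out : String) : Prop := out = rotate_mode_alt notes mode
instance (notes : String) (mode : Int) (out : String) : Decidable (Spec_rotate_mode notes mode out) := by unfold Spec_rotate_mode; infer_instance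

-- ===== CLAIM (what is proved, stated in full; the proofs are below) =====
def Claim_equal_rotate_mode : Prop := ∀ (notes : String) (mode : Int), Dom_rotate_mode notes mode → Pre_rotate_mode notes mode → Spec_rotate_mode notes mode (rotate_mode notes mode)

-- ===== LEMMAS AND PROOFS =====

-- one single-character rotation advances the rotation index by one
theorem pv_rot_succ (l : List Char) (i : Nat) (c : Char) (rest : List Char)
    (h : l.rotate i = c :: rest) : rest ++ [c] = l.rotate (i + 1) := by
  rw [← List.rotate_rotate, h, List.rotate_cons_succ, List.rotate_zero]

-- the head of the i-th rotation is the character at index i % length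
theorem pv_rot_head (l : List Char) (i : Nat) (c : Char) (rest : List Char)
    (h : l.rotate i = c :: rest) : c = l.getD (i % l.length) ' ' := by
  have hlen : 0 < l.length := by
    have hl := List.length_rotate l i
    rw [h] at hl; simp at hl; omega
  have h0 : (l.rotate i)[0]'(by rw [List.length_rotate]; exact hlen) = c := by
    simp [h]
  rw [List.getElem_rotate] at h0
  rw [List.getD_eq_getElem l ' ' (Nat.mod_lt _ hlen)]
  simpa using h0.symm

-- A's dot-skipping rotation loop = B's dot-skipping index loop (matching fuel)
theorem pv_spin_corr (l : List Char) : ∀ (fuel i : Nat),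
    dotSpin (l.rotate i) fuel = l.rotate (dotSkip l i fuel) := by
  intro fuel
  induction fuel with
  | zero => intro i; simp [dotSpin, dotSkip]
  | succ f ih =>
    intro i
    cases h : l.rotate i with
    | nil =>
      have hl : l = [] := by
        have := List.length_rotate l i
        rw [h] at this; simpa [List.length_eq_zero_iff] using this.symm
      subst hl
      simp [dotSpin, dotSkip, List.rotate_nil] at h ⊢
    | cons c rest =>
      have hc : c = l.getD (i % l.length) ' ' := pv_rot_head l i c rest h
      show dotSpin (c :: rest) (f + 1) = _
      simp only [dotSpin, dotSkip, ← hc]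
      by_cases hdot : c = '.'
      · rw [if_pos hdot, if_pos hdot, pv_rot_succ l i c rest h, ih]
      · rw [if_neg hdot, if_neg hdot, ← h]

-- one iteration of A's outer loop, expressed through B's index step
theorem pv_stepA_eq (l : List Char) (hn : l ≠ []) (i m : Nat) :
    rotA (l.rotate i) (m + 1) =
      rotA (l.rotate (dotSkip l (if l.getD (i % l.length) ' ' = 'x' then i + 1 else i)
        l.length)) m := by
  cases h : l.rotate i with
  | nil =>
    have hl := List.length_rotate l i
    rw [h] at hl
    exact absurd (by simpa [List.length_eq_zero_iff] using hl.symm) hn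
  | cons c rest =>
    have hc : c = l.getD (i % l.length) ' ' := pv_rot_head l i c rest h
    show rotA (dotSpin (if c = 'x' then rest ++ [c] else c :: rest)
          (if c = 'x' then rest ++ [c] else c :: rest).length) m = _
    have h1 : (if c = 'x' then rest ++ [c] else c :: rest)
        = l.rotate (if l.getD (i % l.length) ' ' = 'x' then i + 1 else i) := by
      rw [← hc]
      by_cases hx : c = 'x'
      · rw [if_pos hx, if_pos hx, pv_rot_succ l i c rest h]
      · rw [if_neg hx, if_neg hx, ← h]
    rw [h1, List.length_rotate, pv_spin_corr]

-- if B's step does not move the index, A's loop is stuck forever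
theorem pv_fix (l : List Char) (hn : l ≠ []) (i : Nat)
    (hfix : dotSkip l (if l.getD (i % l.length) ' ' = 'x' then i + 1 else i) l.length = i) :
    ∀ m : Nat, rotA (l.rotate i) m = l.rotate i := by
  intro m
  induction m with
  | zero => simp [rotA]
  | succ m ih => rw [pv_stepA_eq l hn i m, hfix, ih]

-- A's outer loop = B's outer loop through the rotation index
theorem pv_loop_corr (l : List Char) (hn : l ≠ []) : ∀ (m i : Nat),
    rotA (l.rotate i) m = l.rotate (loopB l i m) := by
  intro m
  induction m with
  | zero => intro i; simp [rotA, loopB]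
  | succ m ih =>
    intro i
    rw [pv_stepA_eq l hn i m]
    show _ = l.rotate (loopB l i (m + 1))
    simp only [loopB]
    by_cases hj : dotSkip l (if l.getD (i % l.length) ' ' = 'x' then i + 1 else i) l.length = i
    · rw [if_pos hj, hj, pv_fix l hn i hj]
    · rw [if_neg hj, ih]

-- ===== VERDICT (by name: the statement is the Claim_ definition above) =====
theorem rotate_mode_spec : Claim_equal_rotate_mode := by
  intro notes mode _ hpre
  unfold Spec_rotate_mode rotate_mode rotate_mode_alt
  rcases hpre with h0 | ⟨hpos, hne, -⟩
  · subst h0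
    simp only [Int.toNat_zero, rotA, loopB]
    rcases h : notes.toList with _ | ⟨c, rest⟩ <;> simp
  · have hn : notes.toList.length ≠ 0 := by
      simpa [List.length_eq_zero_iff] using hne
    have hrot : rotA notes.toList mode.toNat
        = notes.toList.rotate (loopB notes.toList 0 mode.toNat) := by
      have := pv_loop_corr notes.toList hne mode.toNat 0
      simpa [List.rotate_zero] using this
    rw [hrot]
    show _ = String.mk (List.drop _ _ ++ List.take _ _)
    rw [if_neg hn]
    congr 1
    rw [← List.rotate_mod,
      List.rotate_eq_drop_append_take (le_of_lt (Nat.mod_lt _ (Nat.pos_of_ne_zero hn)))]
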